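-- pv_equiv track=rewrite | github.com/oulipoly/agent-software-developer-skill | scripts/log_extract/correlator.py | _compatible_models
-- ===== SOURCE A (Python) =====
-- def _compatible_models(a: str, b: str) -> bool:
--     """Check if two model names are from the same family."""
--     a_lower, b_lower = a.lower(), b.lower()
--     families = [
--         ("claude", "opus", "sonnet", "haiku"),
--         ("gpt", "codex", "o1", "o3"),
--         ("glm", "cerebras", "zai"),
--         ("gemini",),
--     ]
--     for family in families:
--         a_match = any(tok in a_lower for tok in family)
--         b_match = any(tok in b_lower for tok in family)
--         if a_match and b_match:
--             return True
--     return False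
-- ===== SOURCE B (Python) =====
-- def _compatible_models(a: str, b: str) -> bool:
--     """Check if two model names are from the same family (bitmask over a flat token table)."""
--     token_bit = {
--         "claude": 1, "opus": 1, "sonnet": 1, "haiku": 1,
--         "gpt": 2, "codex": 2, "o1": 2, "o3": 2,
--         "glm": 4, "cerebras": 4, "zai": 4,
--         "gemini": 8,
--     }
--
--     def family_mask(name: str) -> int:
--         name_lower = name.lower()
--         m = 0
--         for tok, bit in token_bit.items():
--             if tok in name_lower:
--                 m |= bit
--         return m
--
--     return (family_mask(a) & family_mask(b)) != 0
-- ===== Notes on version B (the rewrite author's own statement) =====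
-- stated objective: alternative
-- what changed: Replaces the per-family loop with paired boolean matches and early return by a flat token-to-bitmask table: each name is folded once into an integer family bitmask and compatibility is one bitwise AND test.
import Mathlib
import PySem

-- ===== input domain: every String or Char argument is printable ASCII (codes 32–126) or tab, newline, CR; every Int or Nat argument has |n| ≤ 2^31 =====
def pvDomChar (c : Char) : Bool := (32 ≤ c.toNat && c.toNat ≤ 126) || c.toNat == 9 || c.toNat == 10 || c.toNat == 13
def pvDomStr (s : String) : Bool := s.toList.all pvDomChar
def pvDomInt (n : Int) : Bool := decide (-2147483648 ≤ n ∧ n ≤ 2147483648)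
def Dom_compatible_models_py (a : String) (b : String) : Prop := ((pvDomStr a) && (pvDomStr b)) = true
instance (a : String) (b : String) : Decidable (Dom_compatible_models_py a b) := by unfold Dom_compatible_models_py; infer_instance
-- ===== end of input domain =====

-- B replaces A's per-family loop of paired any-matches with early return by a flat
-- token→bitmask table folded once per name into an integer family mask; compatibility
-- is then a single bitwise AND test (alternative decomposition, same cost).

-- ===== PORT A =====
-- the family table of A
def pvFamilies : List (List String) :=
  [["claude", "opus", "sonnet", "haiku"],
   ["gpt", "codex", "o1", "o3"],
   ["glm", "cerebras", "zai"],
   ["gemini"]]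

-- any(tok in s for tok in family)
def pvAnyTok (fam : List String) (s : String) : Bool :=
  fam.any (fun tok => PySem.Str.isIn tok s)

-- A's 'for family in families: … if a_match and b_match: return True' loop
def pvLoopA (al bl : String) : List (List String) → Bool
  | [] => false
  | fam :: rest =>
      if pvAnyTok fam al && pvAnyTok fam bl then true else pvLoopA al bl rest

def compatible_models_py (a : String) (b : String) : Bool :=
  pvLoopA (PySem.Str.lower a) (PySem.Str.lower b) pvFamilies

-- ===== PORT B =====
-- B's flat token_bit dict, in insertion order
def pvTokenBit : List (String × Int) :=
  [("claude", 1), ("opus", 1), ("sonnet", 1), ("haiku", 1),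
   ("gpt", 2), ("codex", 2), ("o1", 2), ("o3", 2),
   ("glm", 4), ("cerebras", 4), ("zai", 4),
   ("gemini", 8)]

-- B's 'm = 0; for tok, bit in token_bit.items(): if tok in name_lower: m |= bit'
def pvFamilyMask (name : String) : Int :=
  let nl := PySem.Str.lower name
  pvTokenBit.foldl (fun m p => if PySem.Str.isIn p.1 nl then Int.lor m p.2 else m) 0

def compatible_models_py_alt (a : String) (b : String) : Bool :=
  decide (Int.land (pvFamilyMask a) (pvFamilyMask b) ≠ 0)

-- ===== PRECONDITION & SPEC =====
def Spec_compatible_models_py (a : String) (b : String) (out : Bool) : Prop := out = compatible_models_py_alt a b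
instance (a : String) (b : String) (out : Bool) : Decidable (Spec_compatible_models_py a b out) := by unfold Spec_compatible_models_py; infer_instance

-- ===== CLAIM (what is proved, stated in full; the proofs are below) =====
def Claim_equal_compatible_models_py : Prop := ∀ (a : String) (b : String), Dom_compatible_models_py a b → Spec_compatible_models_py a b (compatible_models_py a b)

-- ===== LEMMAS AND PROOFS =====

-- OR-ing the same bit twice is the same as once
theorem pv_lor_lor_self (m bit : Int) : Int.lor (Int.lor m bit) bit = Int.lor m bit := by
  cases m <;> cases bit <;> simp only [Int.lor] <;> congr 1 <;>
    apply Nat.eq_of_testBit_eq <;> intro i <;>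
    simp [Nat.testBit_ldiff]; tauto

-- folding one family segment (constant bit) ORs that bit in iff some token matches
theorem pv_fold_seg (nl : String) (bit : Int) (toks : List String) (m : Int) :
    List.foldl (fun m p => if PySem.Str.isIn p.1 nl then Int.lor m p.2 else m) m
      (toks.map (fun t => (t, bit)))
    = if toks.any (fun t => PySem.Str.isIn t nl) then Int.lor m bit else m := by
  induction toks generalizing m with
  | nil => simp
  | cons t ts ih =>
      simp only [List.map, List.foldl, List.any_cons]
      by_cases ht : PySem.Str.isIn t nl
      · simp only [ht, if_pos, Bool.true_or, ih (Int.lor m bit), pv_lor_lor_self, ite_self]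
      · simp only [ht, Bool.false_or, ih m, if_neg, Bool.false_eq_true, not_false_eq_true]

-- the mask of a name in terms of the four family matches
theorem pv_mask_eq (name : String) :
    pvFamilyMask name =
      Int.lor (Int.lor (Int.lor
        (if pvAnyTok ["claude", "opus", "sonnet", "haiku"] (PySem.Str.lower name) then (1 : Int) else 0)
        (if pvAnyTok ["gpt", "codex", "o1", "o3"] (PySem.Str.lower name) then (2 : Int) else 0))
        (if pvAnyTok ["glm", "cerebras", "zai"] (PySem.Str.lower name) then (4 : Int) else 0))
        (if pvAnyTok ["gemini"] (PySem.Str.lower name) then (8 : Int) else 0) := by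
  unfold pvFamilyMask
  generalize PySem.Str.lower name = nl
  have htab : pvTokenBit =
      (["claude", "opus", "sonnet", "haiku"].map (fun t => (t, (1 : Int))))
      ++ (["gpt", "codex", "o1", "o3"].map (fun t => (t, (2 : Int))))
      ++ (["glm", "cerebras", "zai"].map (fun t => (t, (4 : Int))))
      ++ (["gemini"].map (fun t => (t, (8 : Int)))) := by rfl
  rw [htab, List.foldl_append, List.foldl_append, List.foldl_append,
     pv_fold_seg, pv_fold_seg, pv_fold_seg, pv_fold_seg]
  simp only [pvAnyTok]
  split_ifs <;> decide

-- ===== VERDICT (by name: the statement is the Claim_ definition above) =====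
theorem compatible_models_py_spec : Claim_equal_compatible_models_py := by
  intro a b _
  unfold Spec_compatible_models_py compatible_models_py compatible_models_py_alt
  rw [pv_mask_eq a, pv_mask_eq b]
  simp only [pvFamilies, pvLoopA]
  cases h1 : pvAnyTok ["claude", "opus", "sonnet", "haiku"] (PySem.Str.lower a) <;>
  cases h2 : pvAnyTok ["gpt", "codex", "o1", "o3"] (PySem.Str.lower a) <;>
  cases h3 : pvAnyTok ["glm", "cerebras", "zai"] (PySem.Str.lower a) <;>
  cases h4 : pvAnyTok ["gemini"] (PySem.Str.lower a) <;>
  cases h5 : pvAnyTok ["claude", "opus", "sonnet", "haiku"] (PySem.Str.lower b) <;>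
  cases h6 : pvAnyTok ["gpt", "codex", "o1", "o3"] (PySem.Str.lower b) <;>
  cases h7 : pvAnyTok ["glm", "cerebras", "zai"] (PySem.Str.lower b) <;>
  cases h8 : pvAnyTok ["gemini"] (PySem.Str.lower b) <;>
  (try simp only [h1, h2, h3, h4, h5, h6, h7, h8]) <;> decide
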